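-- pv_equiv track=rewrite | github.com/Karolina-Szlek/Python_listy | 9zad3.py | usunLitery
-- ===== SOURCE A (Python) =====
-- def zliczLitery(s):
--     wynik = {}
--     for i in range(len(s)):
--         if wynik.get(s[i]) == None:
--             wynik[s[i]] = 0
--         wynik[s[i]] += 1
--     return wynik
--
-- def usunLitery(w, s):
--     #usuwa z wyrazu s litery wyrazu w
--     ileLiterek = zliczLitery(w)
--     wynik = ''
--     for i in range(len(s)):
--         if ileLiterek.get(s[i]) != None and ileLiterek.get(s[i]) > 0:
--             ileLiterek[s[i]] -= 1
--             continue
--         wynik = wynik + s[i]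
--     return wynik
-- ===== SOURCE B (Python) =====
-- def usunLitery(w, s):
--     # for each letter of w, delete its first remaining occurrence in s
--     for c in w:
--         s = s.replace(c, '', 1)
--     return s
-- ===== Notes on version B (the rewrite author's own statement) =====
-- stated objective: simpler
-- what changed: Replaces the count-dict built from w plus a single filtering pass over s by a plain loop over w that deletes the first remaining occurrence of each letter via s.replace(c, '', 1).
import Mathlib
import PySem

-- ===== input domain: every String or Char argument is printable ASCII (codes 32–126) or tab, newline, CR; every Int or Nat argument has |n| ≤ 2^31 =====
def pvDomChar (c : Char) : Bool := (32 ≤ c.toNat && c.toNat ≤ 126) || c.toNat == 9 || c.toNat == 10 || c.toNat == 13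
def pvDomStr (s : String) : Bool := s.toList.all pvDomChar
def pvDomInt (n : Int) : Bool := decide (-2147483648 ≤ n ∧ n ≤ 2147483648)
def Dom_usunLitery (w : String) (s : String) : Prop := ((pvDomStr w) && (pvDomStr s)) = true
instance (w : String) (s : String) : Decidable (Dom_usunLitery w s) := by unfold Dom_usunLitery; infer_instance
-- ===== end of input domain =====

-- B differs from A by looping over w and deleting first occurrences from s instead of
-- building a count dict from w and filtering s in one pass; objective: simpler.

-- ===== PORT A =====
-- zliczLitery: count each character of s into a dict
def zliczLitery (s : String) : PySem.Dict Char Int :=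
  s.toList.foldl
    (fun d c =>
      let d := if d.get? c = none then d.insert c 0 else d
      d.insert c (d.getD c 0 + 1))
    PySem.Dict.empty

def usunLitery (w : String) (s : String) : String :=
  let ileLiterek := zliczLitery w
  let r := s.toList.foldl
    (fun (p : PySem.Dict Char Int × List Char) c =>
      let (d, wynik) := p
      match d.get? c with
      | some n => if n > 0 then (d.insert c (n - 1), wynik) else (d, wynik ++ [c])
      | none => (d, wynik ++ [c]))
    (ileLiterek, [])
  String.mk r.2

-- ===== PORT B =====
-- hand port of s.replace(c, '', 1): remove the first occurrence of c (exact for a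
-- single-character pattern with count=1)
def removeFirst (c : Char) : List Char → List Char
  | [] => []
  | x :: t => if x == c then t else x :: removeFirst c t

def usunLitery_alt (w : String) (s : String) : String :=
  String.mk (w.toList.foldl (fun acc c => removeFirst c acc) s.toList)

-- ===== PRECONDITION & SPEC =====
def Spec_usunLitery (w : String) (s : String) (out : String) : Prop := out = usunLitery_alt w s
instance (w : String) (s : String) (out : String) : Decidable (Spec_usunLitery w s out) := by unfold Spec_usunLitery; infer_instance

-- ===== CLAIM (what is proved, stated in full; the proofs are below) =====
def Claim_equal_usunLitery : Prop := ∀ (w : String) (s : String), Dom_usunLitery w s → Spec_usunLitery w s (usunLitery w s)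

-- ===== LEMMAS AND PROOFS =====

-- mathematical core: remove, for each char x, the first (f x) occurrences from s
def remCnt (f : Char → Nat) : List Char → List Char
  | [] => []
  | a :: t => if f a > 0 then remCnt (Function.update f a (f a - 1)) t else a :: remCnt f t

-- A's counting step simplifies to a plain insert-increment
lemma zlicz_step (d : PySem.Dict Char Int) (c : Char) :
    (let d' := if d.get? c = none then d.insert c 0 else d
     d'.insert c (d'.getD c 0 + 1)) = d.insert c (d.getD c 0 + 1) := by
  by_cases h : d.get? c = none
  · simp [h, PySem.Dict.getD_insert_self, PySem.Dict.insert_insert_self,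
      PySem.Dict.getD_eq_get?_getD]
  · simp [h]

lemma zlicz_getD (w : String) (c : Char) :
    (zliczLitery w).getD c 0 = (w.toList.count c : Int) := by
  unfold zliczLitery
  have hstep : (fun (d : PySem.Dict Char Int) (c : Char) =>
      let d' := if d.get? c = none then d.insert c 0 else d
      d'.insert c (d'.getD c 0 + 1)) = fun d c => d.insert c (d.getD c 0 + 1) := by
    funext d c; exact zlicz_step d c
  rw [hstep]
  simp [PySem.Dict.getD_foldl_insert_add_one]

-- recursive form of A's filtering loop (accumulator peeled off)
def aRec (d : PySem.Dict Char Int) : List Char → List Char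
  | [] => []
  | c :: t =>
    match d.get? c with
    | some n => if n > 0 then aRec (d.insert c (n - 1)) t else c :: aRec d t
    | none => c :: aRec d t

lemma aLoop_eq_aRec (s : List Char) (d : PySem.Dict Char Int) (acc : List Char) :
    (s.foldl
      (fun (p : PySem.Dict Char Int × List Char) c =>
        let (d, wynik) := p
        match d.get? c with
        | some n => if n > 0 then (d.insert c (n - 1), wynik) else (d, wynik ++ [c])
        | none => (d, wynik ++ [c]))
      (d, acc)).2 = acc ++ aRec d s := by
  induction s generalizing d acc with
  | nil => simp [aRec]
  | cons c t ih =>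
    simp only [List.foldl_cons, aRec]
    cases h : d.get? c with
    | none => simp [h, ih]
    | some n =>
      by_cases hn : n > 0
      · simp [h, hn, ih]
      · simp [h, hn, ih]

-- aRec only sees the (nonnegative-clipped) count function of its dict
lemma aRec_eq_remCnt (s : List Char) (d : PySem.Dict Char Int) :
    aRec d s = remCnt (fun x => (d.getD x 0).toNat) s := by
  induction s generalizing d with
  | nil => simp [aRec, remCnt]
  | cons c t ih =>
    simp only [aRec, remCnt]
    cases h : d.get? c with
    | none =>
      have h0 : (d.getD c 0).toNat = 0 := by
        simp [PySem.Dict.getD_eq_get?_getD, h]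
      simp only [h0]
      simp [ih]
    | some n =>
      have hg : d.getD c 0 = n := by simp [PySem.Dict.getD_eq_get?_getD, h]
      by_cases hn : n > 0
      · have hpos : (d.getD c 0).toNat > 0 := by simp [hg]; omega
        simp only [hn, if_pos hpos, if_true, ih]
        congr 1
        funext x
        by_cases hx : x = c
        · subst hx
          rw [PySem.Dict.getD_insert_self, Function.update_self, hg]
          omega
        · simp [PySem.Dict.getD_insert, hx, Function.update_of_ne hx]
      · have hnn : ¬ (d.getD c 0).toNat > 0 := by simp [hg]; omega
        simp only [hn, if_neg hnn, if_false, ih]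

-- one more copy of c to remove = remove the first c, then the rest
lemma remCnt_succ (c : Char) (s : List Char) (f : Char → Nat) :
    remCnt (Function.update f c (f c + 1)) s = remCnt f (removeFirst c s) := by
  induction s generalizing f with
  | nil => simp [remCnt, removeFirst]
  | cons a t ih =>
    by_cases hac : a = c
    · subst hac
      simp only [removeFirst, beq_self_eq_true, if_true, remCnt, Function.update_self]
      have : Function.update (Function.update f a (f a + 1)) a (f a + 1 - 1) = f := by
        funext x; by_cases hx : x = a <;> simp [Function.update, hx]
      simp [this]
    · have h1 : removeFirst c (a :: t) = a :: removeFirst c t := by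
        simp [removeFirst, hac]
      rw [h1]
      simp only [remCnt, Function.update_of_ne hac]
      by_cases hfa : f a > 0
      · rw [if_pos hfa, if_pos hfa]
        have key : Function.update (Function.update f c (f c + 1)) a (f a - 1)
            = Function.update (Function.update f a (f a - 1)) c
                ((Function.update f a (f a - 1)) c + 1) := by
          funext x
          by_cases hx : x = a
          · subst hx
            rw [Function.update_self, Function.update_of_ne hac, Function.update_self]
          · by_cases hx2 : x = c
            · subst hx2
              rw [Function.update_of_ne hx, Function.update_self, Function.update_self,
                Function.update_of_ne (Ne.symm hac)]
            · rw [Function.update_of_ne hx, Function.update_of_ne hx2,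
                Function.update_of_ne hx2, Function.update_of_ne hx]
        rw [key, ih]
      · rw [if_neg hfa, if_neg hfa, ih]

lemma remCnt_zero (s : List Char) : remCnt (fun _ => 0) s = s := by
  induction s with
  | nil => rfl
  | cons a t ih => simp [remCnt, ih]

lemma remCnt_count (l s : List Char) :
    remCnt (fun x => l.count x) s = l.foldl (fun acc c => removeFirst c acc) s := by
  induction l generalizing s with
  | nil => simpa using remCnt_zero s
  | cons c t ih =>
    have hf : (fun x => (c :: t).count x)
        = Function.update (fun x => t.count x) c (t.count c + 1) := by
      funext x
      by_cases hx : x = c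
      · subst hx; simp [List.count_cons, Function.update_self]
      · rw [Function.update_of_ne hx]
        simp [Ne.symm hx]
    rw [hf, remCnt_succ, ih]
    rfl

-- ===== VERDICT (by name: the statement is the Claim_ definition above) =====
theorem usunLitery_spec : Claim_equal_usunLitery := by
  intro w s _
  unfold Spec_usunLitery usunLitery usunLitery_alt
  simp only
  rw [aLoop_eq_aRec, aRec_eq_remCnt]
  have hc : (fun x => ((zliczLitery w).getD x 0).toNat) = fun x => w.toList.count x := by
    funext x; rw [zlicz_getD]; simp
  rw [hc, remCnt_count]
  simp
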